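-- pv_equiv track=rewrite | github.com/pypi-data/pypi-mirror-399 | packages/hwpers/hwpers-0.4.0.tar.gz/hwpers-0.4.0/docs-src/sync_docs.py | extract_guide_content
-- ===== SOURCE A (Python) =====
-- EXCLUDE_SECTIONS = ["API Reference", "Documentation", "License"]
--
-- def extract_guide_content(readme_content: str) -> str:
--     """Extract guide content from README, excluding API reference tables."""
--     lines = readme_content.split("\n")
--     result = []
--     skip = False
--
--     for line in lines:
--         # Check for section headers
--         if line.startswith("## "):
--             section_name = line[3:].strip()
--             skip = section_name in EXCLUDE_SECTIONS
--
--         if not skip: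
--             result.append(line)
--
--     return "\n".join(result).strip()
-- ===== SOURCE B (Python) =====
-- EXCLUDE_SECTIONS = ["API Reference", "Documentation", "License"]
--
-- def extract_guide_content(readme_content: str) -> str:
--     """Extract guide content from README, excluding API reference tables."""
--     lines = readme_content.split("\n")
--     # Partition lines into sections: a new section starts at each '## ' header.
--     sections = []
--     cur = []
--     for line in lines:
--         if line.startswith("## "):
--             sections.append(cur)
--             cur = [line]
--         else:
--             cur.append(line)
--     sections.append(cur)
--     # Keep every section whose header is not excluded (the preamble is always kept).
--     kept = []
--     for sec in sections:
--         if sec and sec[0].startswith("## ") and sec[0][3:].strip() in EXCLUDE_SECTIONS: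
--             continue
--         kept.extend(sec)
--     return "\n".join(kept).strip()
-- ===== Notes on version B (the rewrite author's own statement) =====
-- stated objective: alternative
-- what changed: Replaces the running skip-flag scan with an explicit partition of the lines into header-delimited sections followed by a filter that drops whole excluded sections and concatenates the rest.
import Mathlib
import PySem

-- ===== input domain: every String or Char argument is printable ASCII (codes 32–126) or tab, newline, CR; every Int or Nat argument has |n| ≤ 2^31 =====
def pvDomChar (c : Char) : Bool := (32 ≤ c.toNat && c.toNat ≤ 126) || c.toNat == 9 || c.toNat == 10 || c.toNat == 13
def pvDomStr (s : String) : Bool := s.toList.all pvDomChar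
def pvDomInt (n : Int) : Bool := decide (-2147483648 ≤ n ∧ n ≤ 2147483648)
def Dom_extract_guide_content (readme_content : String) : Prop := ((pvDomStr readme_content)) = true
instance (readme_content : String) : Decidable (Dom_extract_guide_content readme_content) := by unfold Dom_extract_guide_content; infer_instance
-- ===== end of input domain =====

-- B replaces A's running skip-flag scan by partitioning the lines into header-delimited
-- sections and filtering out whole excluded sections (alternative decomposition, same cost).

-- ===== PORT A =====
def EXCLUDE_SECTIONS : List String := ["API Reference", "Documentation", "License"]

-- A's loop body: update the skip flag at a '## ' header, append the line when not skipping.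
def pvStepA (st : List String × Bool) (line : String) : List String × Bool :=
  let skip := if PySem.Str.startswith line "## " then
      EXCLUDE_SECTIONS.contains (PySem.Str.strip (PySem.Str.slice line (some 3) none))
    else st.2
  if skip then (st.1, skip) else (st.1 ++ [line], skip)

def extract_guide_content (readme_content : String) : String :=
  let lines := (PySem.Str.split? readme_content "\n").getD []
  PySem.Str.strip (PySem.Str.join "\n" (lines.foldl pvStepA ([], false)).1)

-- ===== PORT B =====
-- B's exclusion test: 'sec and sec[0].startswith("## ") and sec[0][3:].strip() in EXCLUDE_SECTIONS'
def pvExcluded : List String → Bool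
  | [] => false
  | h :: _ => PySem.Str.startswith h "## " &&
      EXCLUDE_SECTIONS.contains (PySem.Str.strip (PySem.Str.slice h (some 3) none))

-- B's partition loop body: start a new section at a '## ' header, else extend the current one.
def pvStepB (st : List (List String) × List String) (line : String) : List (List String) × List String :=
  if PySem.Str.startswith line "## " then (st.1 ++ [st.2], [line]) else (st.1, st.2 ++ [line])

def extract_guide_content_alt (readme_content : String) : String :=
  let lines := (PySem.Str.split? readme_content "\n").getD []
  let st := lines.foldl pvStepB ([], [])
  let kept := (st.1 ++ [st.2]).foldl (fun acc sec => if pvExcluded sec then acc else acc ++ sec) []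
  PySem.Str.strip (PySem.Str.join "\n" kept)

-- ===== PRECONDITION & SPEC =====
def Spec_extract_guide_content (readme_content : String) (out : String) : Prop := out = extract_guide_content_alt readme_content
instance (readme_content : String) (out : String) : Decidable (Spec_extract_guide_content readme_content out) := by unfold Spec_extract_guide_content; infer_instance

-- ===== CLAIM (what is proved, stated in full; the proofs are below) =====
def Claim_equal_extract_guide_content : Prop := ∀ (readme_content : String), Dom_extract_guide_content readme_content → Spec_extract_guide_content readme_content (extract_guide_content readme_content)

-- ===== LEMMAS AND PROOFS =====

-- lines kept from a single section
def pvKeep (cur : List String) : List String := if pvExcluded cur then [] else cur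

-- lines kept from a list of sections
def pvK (ss : List (List String)) : List String := (ss.filter (fun s => !pvExcluded s)).flatten

theorem pvK_append (a b : List (List String)) : pvK (a ++ b) = pvK a ++ pvK b := by
  simp [pvK]

theorem pvK_single (c : List String) : pvK [c] = pvKeep c := by
  simp only [pvK, pvKeep, List.filter]
  split <;> simp_all

theorem pvK_cons (c : List String) (t : List (List String)) : pvK (c :: t) = pvKeep c ++ pvK t := by
  simp only [pvK, pvKeep, List.filter]
  split <;> simp_all

theorem keptL (ss : List (List String)) (acc : List String) :
    ss.foldl (fun acc sec => if pvExcluded sec then acc else acc ++ sec) acc = acc ++ pvK ss := by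
  induction ss generalizing acc with
  | nil => simp [pvK]
  | cons s t ih =>
    by_cases h : pvExcluded s = true
    · simp [List.foldl_cons, h, ih, pvK]
    · simp [List.foldl_cons, h, ih, pvK]

theorem pvExcluded_snoc (cur : List String) (line : String)
    (h : PySem.Str.startswith line "## " = false) :
    pvExcluded (cur ++ [line]) = pvExcluded cur := by
  cases cur with
  | nil => simp only [List.nil_append, pvExcluded, h, Bool.false_and]
  | cons a t => rfl

theorem foldB_acc (lines : List String) : ∀ (secs : List (List String)) (cur : List String),
    lines.foldl pvStepB (secs, cur) =
      (secs ++ (lines.foldl pvStepB ([], cur)).1, (lines.foldl pvStepB ([], cur)).2) := by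
  induction lines with
  | nil => intro secs cur; simp
  | cons line rest ih =>
    intro secs cur
    simp only [List.foldl_cons, pvStepB]
    by_cases h : PySem.Str.startswith line "## " = true
    · simp only [h, if_true, List.nil_append]
      rw [ih (secs ++ [cur]) [line], ih [cur] [line]]
      simp
    · simp only [h]
      exact ih secs (cur ++ [line])

theorem key (lines : List String) : ∀ (cur r : List String),
    lines.foldl pvStepA (r ++ pvKeep cur, pvExcluded cur)
      = (r ++ pvK ((lines.foldl pvStepB ([], cur)).1 ++ [(lines.foldl pvStepB ([], cur)).2]),
         pvExcluded (lines.foldl pvStepB ([], cur)).2) := by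
  induction lines with
  | nil => intro cur r; simp [pvK_single]
  | cons line rest ih =>
    intro cur r
    simp only [List.foldl_cons]
    by_cases h : PySem.Str.startswith line "## " = true
    · have hstep : pvStepA (r ++ pvKeep cur, pvExcluded cur) line
          = ((r ++ pvKeep cur) ++ pvKeep [line], pvExcluded [line]) := by
        simp only [pvStepA, h, if_true, pvExcluded, pvKeep, Bool.true_and]
        by_cases he : PySem.Str.strip (PySem.Str.slice line (some 3) none) ∈ EXCLUDE_SECTIONS <;>
          simp [he]
      rw [hstep, ih [line] (r ++ pvKeep cur)]
      have hB : pvStepB ([], cur) line = ([cur], [line]) := by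
        simp only [pvStepB, h, if_true, List.nil_append]
      rw [hB, foldB_acc rest [cur] [line]]
      simp [pvK_cons, pvK_append, List.append_assoc]
    · simp only [Bool.not_eq_true] at h
      have h' : PySem.Chars.startswith line.toList ['#', '#', ' '] = false := by
        simpa using h
      have hB : pvStepB ([], cur) line = ([], cur ++ [line]) := by
        simp [pvStepB, h']
      have hstep : pvStepA (r ++ pvKeep cur, pvExcluded cur) line
          = (r ++ pvKeep (cur ++ [line]), pvExcluded (cur ++ [line])) := by
        simp only [pvStepA, h, Bool.false_eq_true, reduceIte, pvKeep,
          pvExcluded_snoc cur line h]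
        by_cases hc : pvExcluded cur = true <;> simp [hc]
      rw [hstep, ih (cur ++ [line]) r, hB]

theorem key0 (lines : List String) :
    (lines.foldl pvStepA ([], false)).1
      = pvK ((lines.foldl pvStepB ([], [])).1 ++ [(lines.foldl pvStepB ([], [])).2]) := by
  have h := congrArg Prod.fst (key lines [] [])
  simpa [pvKeep, pvExcluded] using h

-- ===== VERDICT (by name: the statement is the Claim_ definition above) =====
theorem extract_guide_content_spec : Claim_equal_extract_guide_content := by
  intro s _
  unfold Spec_extract_guide_content extract_guide_content extract_guide_content_alt
  simp only [keptL, key0, List.nil_append]
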